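-- pv_equiv track=rewrite | github.com/ghelmer/pysh-rescue | shell.py | if_nesting_delta
-- ===== SOURCE A (Python) =====
-- def if_nesting_delta(tokens: list[str]) -> int:
--     """ Check to see if a `fi` is in this line. """
--     at_cmd_start = True
--     delta = 0
--     for tok in tokens:
--         if tok == ";":
--             at_cmd_start = True
--             continue
--         if at_cmd_start:
--             if tok == "if":
--                 delta += 1
--             elif tok == "fi":
--                 delta -= 1
--             at_cmd_start = False
--     return delta
-- ===== SOURCE B (Python) =====
-- def if_nesting_delta(tokens: list[str]) -> int:
--     """ Check to see if a `fi` is in this line. """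
--     groups = []
--     cur = []
--     for tok in tokens:
--         if tok == ";":
--             groups.append(cur)
--             cur = []
--         else:
--             cur.append(tok)
--     groups.append(cur)
--     delta = 0
--     for g in groups:
--         if g:
--             if g[0] == "if":
--                 delta += 1
--             elif g[0] == "fi":
--                 delta -= 1
--     return delta
-- ===== Notes on version B (the rewrite author's own statement) =====
-- stated objective: alternative
-- what changed: Replaced the stateful at_cmd_start flag walk by an explicit split of the token line into ';'-separated command groups followed by a pass that inspects only each group's first token.
import Mathlib
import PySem

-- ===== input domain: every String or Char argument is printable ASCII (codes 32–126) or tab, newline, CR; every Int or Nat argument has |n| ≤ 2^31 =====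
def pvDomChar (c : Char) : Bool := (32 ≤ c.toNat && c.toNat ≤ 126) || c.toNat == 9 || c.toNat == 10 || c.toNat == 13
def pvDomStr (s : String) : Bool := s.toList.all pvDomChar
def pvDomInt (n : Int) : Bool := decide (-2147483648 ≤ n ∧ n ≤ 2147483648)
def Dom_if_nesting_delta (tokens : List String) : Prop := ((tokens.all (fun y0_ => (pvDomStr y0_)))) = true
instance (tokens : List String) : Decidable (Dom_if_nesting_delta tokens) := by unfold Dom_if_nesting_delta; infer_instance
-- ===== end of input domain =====

-- B replaces A's at_cmd_start flag walk by an explicit split into ';'-separated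
-- command groups followed by a head-inspection pass (alternative decomposition).

-- ===== PORT A =====
-- state = (at_cmd_start, delta), one fold step per token, branches in A's order
def ifStepA (s : Bool × Int) (tok : String) : Bool × Int :=
  if tok = ";" then (true, s.2)
  else if s.1 then
    (false, if tok = "if" then s.2 + 1 else if tok = "fi" then s.2 - 1 else s.2)
  else s

def if_nesting_delta (tokens : List String) : Int :=
  (tokens.foldl ifStepA (true, 0)).2

-- ===== PORT B =====
-- split tokens into command groups on ';' (cur kept reversed, flushed in order)
def ifGroups : List String → List String → List (List String)
  | [], cur => [cur.reverse]
  | t :: ts, cur => if t = ";" then cur.reverse :: ifGroups ts [] else ifGroups ts (t :: cur)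

-- contribution of one group: look only at its first token; empty group counts 0
def ifHeadDelta : List String → Int
  | [] => 0
  | t :: _ => if t = "if" then 1 else if t = "fi" then -1 else 0

def if_nesting_delta_alt (tokens : List String) : Int :=
  (ifGroups tokens []).foldl (fun d g => d + ifHeadDelta g) 0

-- ===== PRECONDITION & SPEC =====
def Spec_if_nesting_delta (tokens : List String) (out : Int) : Prop := out = if_nesting_delta_alt tokens
instance (tokens : List String) (out : Int) : Decidable (Spec_if_nesting_delta tokens out) := by unfold Spec_if_nesting_delta; infer_instance

-- ===== CLAIM (what is proved, stated in full; the proofs are below) =====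
def Claim_equal_if_nesting_delta : Prop := ∀ (tokens : List String), Dom_if_nesting_delta tokens → Spec_if_nesting_delta tokens (if_nesting_delta tokens)

-- ===== LEMMAS AND PROOFS =====

theorem ifHeadDelta_snoc (cur : List String) (t : String) (h : cur ≠ []) :
    ifHeadDelta (cur ++ [t]) = ifHeadDelta cur := by
  cases cur with
  | nil => exact absurd rfl h
  | cons c cs => simp [ifHeadDelta]

theorem foldl_add_headDelta (gs : List (List String)) (d : Int) :
    gs.foldl (fun d g => d + ifHeadDelta g) d = d + (gs.map ifHeadDelta).sum := by
  induction gs generalizing d with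
  | nil => simp
  | cons g gs ih => simp [List.foldl, ih]; ring

-- the key invariant: A's fold from state (cur = [], d) equals d plus the head
-- deltas of the remaining groups, minus the first group's head already counted
theorem ifInvariant (ts : List String) (cur : List String) (d : Int) :
    (ts.foldl ifStepA (decide (cur = []), d)).2
      = d + ((ifGroups ts cur).map ifHeadDelta).sum - ifHeadDelta cur.reverse := by
  induction ts generalizing cur d with
  | nil => simp [ifGroups]
  | cons t ts ih =>
    by_cases hsemi : t = ";"
    · subst hsemi
      have := ih [] d
      simp only [List.reverse_nil, decide_true] at this
      have h0 : ifHeadDelta [] = 0 := rfl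
      rw [h0, sub_zero] at this
      simp only [List.foldl, ifStepA, ifGroups, if_true, List.map_cons, List.sum_cons, this]
      ring
    · by_cases hcur : cur = []
      · subst hcur
        have hfalse : (decide ([t] = ([] : List String))) = false := by simp
        have := ih [t] (if t = "if" then d + 1 else if t = "fi" then d - 1 else d)
        rw [hfalse] at this
        simp only [List.foldl, ifStepA, if_neg hsemi, ifGroups, List.reverse_singleton,
          List.reverse_nil, decide_true, if_true] at this ⊢
        rw [this]
        simp only [ifHeadDelta]
        split_ifs <;> ring
      · simp only [List.foldl, ifStepA, if_neg hsemi, ifGroups]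
        have hfalse : (decide (cur = ([] : List String))) = false := by simp [hcur]
        rw [hfalse]
        have := ih (t :: cur) d
        have hne : (decide (t :: cur = ([] : List String))) = false := by simp
        rw [hne] at this
        simp only [Bool.false_eq_true, if_false] at this ⊢
        rw [this]
        have : ifHeadDelta (t :: cur).reverse = ifHeadDelta cur.reverse := by
          simp only [List.reverse_cons]
          exact ifHeadDelta_snoc cur.reverse t (by simp [hcur])
        rw [this]

-- ===== VERDICT (by name: the statement is the Claim_ definition above) =====
theorem if_nesting_delta_spec : Claim_equal_if_nesting_delta := by
  intro tokens _
  unfold Spec_if_nesting_delta if_nesting_delta if_nesting_delta_alt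
  have := ifInvariant tokens [] 0
  simp [ifHeadDelta] at this
  rw [foldl_add_headDelta]
  simpa using this
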